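-- pv_equiv track=rewrite | github.com/sna195/atcoder | contest/regular_140/shorten_ARC.py | search_ARC
-- ===== SOURCE A (Python) =====
-- def search_ARC(s):
--     cnt_replace = []
--     for i in range(len(s) - 2):
--         if s[i+2] == 'A':
--             i += 1
--         elif s[i:i+3] == 'ARC':
--             j = 1
--             while i-j >= 0 and i+j+2 < len(s) and s[i-j] == 'A' and s[i+j+2] == 'C':
--                 j += 1
--             cnt_replace.append(j)
--             i += j + 1
--         else:
--             continue
--
--     cnt_replace.sort()
--     return cnt_replace
-- ===== SOURCE B (Python) =====
-- def search_ARC(s):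
--     n = len(s)
--     leftA = []
--     run = 0
--     for ch in s:
--         run = run + 1 if ch == 'A' else 0
--         leftA.append(run)
--     rightC = []
--     run = 0
--     for ch in reversed(s):
--         run = run + 1 if ch == 'C' else 0
--         rightC.append(run)
--     rightC.reverse()
--     counts = [1 + min(leftA[i-1] if i > 0 else 0,
--                       rightC[i+3] if i + 3 < n else 0)
--               for i in range(n - 2) if s[i:i+3] == 'ARC']
--     counts.sort()
--     return counts
-- ===== Notes on version B (the rewrite author's own statement) =====
-- stated objective: alternative
-- what changed: Replaces A's per-match outward-expanding while loop by two linear run-length sweeps (consecutive-A run ending at each index, consecutive-C run starting at each index) and a single indexed pass that reads 1+min of the two precomputed tables at each match position.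
import Mathlib
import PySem

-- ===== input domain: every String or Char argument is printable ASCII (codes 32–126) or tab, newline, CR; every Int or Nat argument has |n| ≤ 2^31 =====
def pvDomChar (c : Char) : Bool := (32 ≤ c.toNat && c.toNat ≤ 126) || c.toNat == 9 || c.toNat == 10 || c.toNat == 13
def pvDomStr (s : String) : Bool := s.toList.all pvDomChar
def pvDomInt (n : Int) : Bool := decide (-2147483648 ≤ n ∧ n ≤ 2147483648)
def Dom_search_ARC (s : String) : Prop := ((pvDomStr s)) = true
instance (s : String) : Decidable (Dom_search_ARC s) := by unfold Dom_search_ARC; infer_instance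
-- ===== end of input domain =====

-- B replaces A's per-match outward-expanding while loop by two precomputed run-length
-- tables and one indexed pass (objective: alternative decomposition; same asymptotic cost here).

-- ===== PORT A =====
-- A's inner while loop: j starts at 1 and grows while s[i-j]=='A' and s[i+j+2]=='C' (guards
-- keep every index in range, so `l[·]?` is exact for Python's s[·]).
def pvWhile (l : List Char) (i j : Nat) : Nat :=
  if h : j ≤ i ∧ i + j + 2 < l.length ∧ l[i-j]? = some 'A' ∧ l[i+j+2]? = some 'C' then
    pvWhile l i (j+1)
  else j
termination_by l.length - j
decreasing_by omega

-- s[i:i+3] with 0 ≤ i ported as (drop i).take 3 (exact for nonnegative bounds); s.sort() is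
-- PySem.List.sorted with the identity key. The dead `i += …` inside Python's for loop has no effect.
def search_ARC (s : String) : List Int :=
  let l := s.toList
  let cnt := (List.range (l.length - 2)).foldl (fun acc i =>
    if l[i+2]? = some 'A' then acc
    else if (l.drop i).take 3 = ['A','R','C'] then acc ++ [(pvWhile l i 1 : Int)]
    else acc) ([] : List Int)
  PySem.List.sorted cnt (fun x => x) false

-- ===== PORT B =====
-- the run-length sweep of Source B: running count of consecutive `c`, appended per element
def pvSweep (c : Char) (l : List Char) : List Nat :=
  (l.foldl (fun (p : List Nat × Nat) ch =>
    let run := if ch = c then p.2 + 1 else 0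
    (p.1 ++ [run], run)) (([] : List Nat), 0)).1

def search_ARC_alt (s : String) : List Int :=
  let l := s.toList
  let n := l.length
  let leftA := pvSweep 'A' l
  let rightC := (pvSweep 'C' l.reverse).reverse
  let counts := (List.range (n - 2)).filterMap (fun i =>
    if (l.drop i).take 3 = ['A','R','C'] then
      some ((1 + min (if 0 < i then leftA.getD (i-1) 0 else 0)
                     (if i + 3 < n then rightC.getD (i+3) 0 else 0) : Nat) : Int)
    else none)
  PySem.List.sorted counts (fun x => x) false

-- ===== PRECONDITION & SPEC =====
def Spec_search_ARC (s : String) (out : List Int) : Prop := out = search_ARC_alt s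
instance (s : String) (out : List Int) : Decidable (Spec_search_ARC s out) := by unfold Spec_search_ARC; infer_instance

-- ===== CLAIM (what is proved, stated in full; the proofs are below) =====
def Claim_equal_search_ARC : Prop := ∀ (s : String), Dom_search_ARC s → Spec_search_ARC s (search_ARC s)

-- ===== LEMMAS AND PROOFS =====

-- run of `c` ending at position k, seeded with r before position 0
def pvRunEnd (c : Char) (l : List Char) (r : Nat) : Nat → Nat
  | 0 => if l[0]? = some c then r + 1 else 0
  | k+1 => if l[k+1]? = some c then pvRunEnd c l r k + 1 else 0

-- maximal t with l[i-j] = … = l[i-j-t+1] = 'A' (stopping at index 0)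
def pvLdown (l : List Char) (i j : Nat) : Nat :=
  if h : j ≤ i ∧ l[i-j]? = some 'A' then pvLdown l i (j+1) + 1 else 0
termination_by i + 1 - j

-- run of 'C' starting at position p
def pvRcF (l : List Char) (p : Nat) : Nat :=
  if h : p < l.length ∧ l[p]? = some 'C' then pvRcF l (p+1) + 1 else 0
termination_by l.length - p

-- recursive form of the sweep (proof helper)
def pvScanRec (c : Char) : List Char → Nat → List Nat
  | [], _ => []
  | ch :: m, r =>
    let r' := if ch = c then r + 1 else 0
    r' :: pvScanRec c m r'

-- the sweep's foldl, with generalized accumulator, produces the recursive scan list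
theorem pvSweep_foldl (c : Char) : ∀ (m : List Char) (acc : List Nat) (r : Nat),
    (m.foldl (fun (p : List Nat × Nat) ch =>
      let run := if ch = c then p.2 + 1 else 0
      (p.1 ++ [run], run)) (acc, r)).1 = acc ++ pvScanRec c m r
  | [], acc, r => by simp [pvScanRec]
  | ch :: m, acc, r => by
    simp only [List.foldl_cons, pvScanRec]
    rw [pvSweep_foldl c m]
    simp

theorem pvSweep_eq (c : Char) (l : List Char) : pvSweep c l = pvScanRec c l 0 := by
  simpa using pvSweep_foldl c l [] 0

theorem pvScanRec_length (c : Char) : ∀ (m : List Char) (r : Nat),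
    (pvScanRec c m r).length = m.length
  | [], _ => rfl
  | ch :: m, r => by simp [pvScanRec, pvScanRec_length c m]

theorem pvRunEnd_shift (c ch : Char) (m : List Char) (r : Nat) :
    ∀ k, pvRunEnd c m (if ch = c then r + 1 else 0) k = pvRunEnd c (ch :: m) r (k+1)
  | 0 => by
    simp only [pvRunEnd, List.getElem?_cons_succ, List.getElem?_cons_zero, Option.some.injEq]
  | k+1 => by
    conv_lhs => rw [pvRunEnd]
    conv_rhs => rw [pvRunEnd]
    rw [List.getElem?_cons_succ, pvRunEnd_shift c ch m r k]

theorem pvScanRec_getElem (c : Char) : ∀ (m : List Char) (r k : Nat), k < m.length →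
    (pvScanRec c m r)[k]? = some (pvRunEnd c m r k)
  | ch :: m, r, 0, _ => by
    simp [pvScanRec, pvRunEnd]
  | ch :: m, r, k+1, hk => by
    simp only [pvScanRec, List.getElem?_cons_succ]
    rw [pvScanRec_getElem c m _ k (by simpa using hk), pvRunEnd_shift]

-- A's while loop computes 1 + min(left A-run, right C-run) shifted by the start j
theorem pvWhile_eq (l : List Char) (i : Nat) : ∀ j,
    pvWhile l i j = j + min (pvLdown l i j) (pvRcF l (i+j+2)) := by
  intro j
  fun_induction pvWhile l i j with
  | case1 j h ih =>
    rw [ih]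
    conv_rhs => rw [pvLdown, pvRcF]
    rw [dif_pos ⟨h.1, h.2.2.1⟩, dif_pos ⟨h.2.1, h.2.2.2⟩]
    rw [show i + (j+1) + 2 = i + j + 2 + 1 from by omega]
    omega
  | case2 j h =>
    have h0 : pvLdown l i j = 0 ∨ pvRcF l (i+j+2) = 0 := by
      by_cases h1 : j ≤ i ∧ l[i-j]? = some 'A'
      · right
        rw [pvRcF, dif_neg]
        intro h2
        exact h ⟨h1.1, h2.1, h1.2, h2.2⟩
      · left
        rw [pvLdown, dif_neg h1]
    omega

theorem pvLdown_eq (l : List Char) (i : Nat) : ∀ k, k ≤ i →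
    pvLdown l i (i - k) = pvRunEnd 'A' l 0 k
  | 0, _ => by
    rw [Nat.sub_zero, pvLdown]
    have h0 : pvLdown l i (i+1) = 0 := by rw [pvLdown, dif_neg (by omega)]
    rw [Nat.sub_self]
    by_cases h : l[0]? = some 'A'
    · rw [dif_pos ⟨le_refl i, h⟩, h0, pvRunEnd, if_pos h]
    · rw [dif_neg (fun hc => h hc.2), pvRunEnd, if_neg h]
  | k+1, hk => by
    rw [pvLdown]
    have h1 : i - (i - (k+1)) = k + 1 := by omega
    have h2 : i - (k+1) + 1 = i - k := by omega
    rw [h1, h2]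
    by_cases h : l[k+1]? = some 'A'
    · rw [dif_pos ⟨by omega, h⟩, pvLdown_eq l i k (by omega)]
      simp [pvRunEnd, h]
    · rw [dif_neg (by simp [h])]
      simp [pvRunEnd, h]

theorem pvRcF_rev (l : List Char) : ∀ (k p : Nat), p < l.length → p + k = l.length - 1 →
    pvRunEnd 'C' l.reverse 0 k = pvRcF l p
  | 0, p, hp, hpk => by
    rw [pvRunEnd, pvRcF]
    have hrev : l.reverse[0]? = l[p]? := by
      rw [List.getElem?_reverse (by omega)]
      congr 1
      omega
    rw [hrev]
    by_cases h : l[p]? = some 'C'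
    · rw [if_pos h, dif_pos ⟨hp, h⟩]
      rw [show pvRcF l (p+1) = 0 from by rw [pvRcF, dif_neg (by omega)]]
    · rw [if_neg h, dif_neg (by simp [h])]
  | k+1, p, hp, hpk => by
    rw [pvRunEnd, pvRcF]
    have hrev : l.reverse[k+1]? = l[p]? := by
      rw [List.getElem?_reverse (by omega)]
      congr 1
      omega
    rw [hrev, pvRcF_rev l k (p+1) (by omega) (by omega)]
    by_cases h : l[p]? = some 'C'
    · rw [if_pos h, dif_pos ⟨hp, h⟩]
    · rw [if_neg h, dif_neg (by simp [h])]

-- per-position value equality: A's while-result = B's table formula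
theorem value_eq (l : List Char) (i : Nat) (hi : i < l.length - 2) :
    pvWhile l i 1 =
      1 + min (if 0 < i then (pvSweep 'A' l).getD (i-1) 0 else 0)
              (if i + 3 < l.length then ((pvSweep 'C' l.reverse).reverse).getD (i+3) 0 else 0) := by
  have hL : (if 0 < i then (pvSweep 'A' l).getD (i-1) 0 else 0) = pvLdown l i 1 := by
    by_cases h0 : 0 < i
    · rw [if_pos h0, pvSweep_eq]
      rw [List.getD_eq_getElem?_getD, pvScanRec_getElem 'A' l 0 (i-1) (by omega), Option.getD_some]
      have h2 := pvLdown_eq l i (i-1) (by omega)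
      rw [show i - (i-1) = 1 from by omega] at h2
      exact h2.symm
    · rw [if_neg h0, pvLdown, dif_neg (by omega)]
  have hR : (if i + 3 < l.length then ((pvSweep 'C' l.reverse).reverse).getD (i+3) 0 else 0)
      = pvRcF l (i+3) := by
    by_cases h0 : i + 3 < l.length
    · rw [if_pos h0, pvSweep_eq]
      have hlen : (pvScanRec 'C' l.reverse 0).length = l.length := by
        rw [pvScanRec_length, List.length_reverse]
      rw [List.getD_eq_getElem?_getD, List.getElem?_reverse (by omega), hlen,
          pvScanRec_getElem 'C' l.reverse 0 _ (by rw [List.length_reverse]; omega), Option.getD_some,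
          pvRcF_rev l (l.length - 1 - (i+3)) (i+3) h0 (by omega)]
    · rw [if_neg h0, pvRcF, dif_neg (by omega)]
  rw [pvWhile_eq, show i + 1 + 2 = i + 3 from by omega, ← hL, ← hR]

-- the slice test forces s[i+2] = 'C', so A's first branch never fires on a match
theorem slice_third (l : List Char) (i : Nat)
    (h : (l.drop i).take 3 = ['A','R','C']) : l[i+2]? = some 'C' := by
  have := congrArg (fun xs => xs[2]?) h
  simpa [List.getElem?_take, List.getElem?_drop] using this

-- if-some-else-none filterMap is filter-then-map
theorem filterMap_if (p : Nat → Prop) [DecidablePred p] (f : Nat → Int) (xs : List Nat) :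
    xs.filterMap (fun i => if p i then some (f i) else none)
      = (xs.filter (fun i => decide (p i))).map f := by
  induction xs with
  | nil => rfl
  | cons a xs ih =>
    by_cases h : p a <;> simp [h, ih]

theorem search_ARC_spec' (s : String) : search_ARC s = search_ARC_alt s := by
  simp only [search_ARC, search_ARC_alt]
  set l := s.toList with hl
  congr 1
  have hstep : (fun (acc : List Int) i =>
      if l[i+2]? = some 'A' then acc
      else if (l.drop i).take 3 = ['A','R','C'] then acc ++ [(pvWhile l i 1 : Int)]
      else acc)
      = (fun (acc : List Int) i =>
      if (l.drop i).take 3 = ['A','R','C'] then acc ++ [(pvWhile l i 1 : Int)] else acc) := by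
    funext acc i
    by_cases hs : (l.drop i).take 3 = ['A','R','C']
    · have := slice_third l i hs
      simp [hs, this]
    · simp [hs]
  rw [hstep, PySem.List.foldl_append_ite, filterMap_if]
  apply List.map_congr_left
  intro i hi
  simp only [List.mem_filter, List.mem_range, decide_eq_true_eq] at hi
  exact_mod_cast congrArg (Nat.cast : Nat → Int) (value_eq l i hi.1)

-- ===== VERDICT (by name: the statement is the Claim_ definition above) =====
theorem search_ARC_spec : Claim_equal_search_ARC := by
  intro s _; exact search_ARC_spec' s
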